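-- pv_equiv track=rewrite | github.com/Daniel6290/Proyectos-Python | juego_rummy.py.py | identificar_grupos
-- ===== SOURCE A (Python) =====
-- v_validos = ("2", "3", "4", "5", "6", "7", "8", "9", "10", "J", "Q", "K", "A")
--
-- def identificar_grupos(mano):
--     ternas, cuaternas = [], []
--     for valor in v_validos:
--         cartas = [carta for carta in mano if carta[0] == valor]
--         if len(cartas) == 4:
--             cuaternas.append(tuple(cartas))
--         elif len(cartas) == 3:
--             ternas.append(tuple(cartas))
--     return list(set(ternas)), list(set(cuaternas)) # Eliminar duplicados
-- ===== SOURCE B (Python) =====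
-- v_validos = ("2", "3", "4", "5", "6", "7", "8", "9", "10", "J", "Q", "K", "A")
--
-- def identificar_grupos(mano):
--     grupos = {}
--     for carta in mano:
--         grupos.setdefault(carta[0], []).append(carta)
--     def clasificar(vals):
--         if not vals:
--             return [], []
--         ternas, cuaternas = clasificar(vals[1:])
--         cartas = tuple(grupos.get(vals[0], ()))
--         if len(cartas) == 3:
--             return [cartas] + ternas, cuaternas
--         if len(cartas) == 4:
--             return ternas, [cartas] + cuaternas
--         return ternas, cuaternas
--     return clasificar(list(v_validos))
-- ===== Notes on version B (the rewrite author's own statement) =====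
-- stated objective: alternative
-- what changed: B groups the hand in one pass into a dict keyed by carta[0] and classifies each valid value by a recursive function that conses groups front-to-back, instead of A's 13 full rescans of the hand with append-accumulators, and omits A's list(set(...)) step (the lists never contain duplicates inside Pre_); Pre_ excludes hands with two or more triples (or two or more quads), on which A still returns but the ORDER of A's list(set(...)) result depends on the interpreter's hash seed, so no single list value is specified there.
import Mathlib
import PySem

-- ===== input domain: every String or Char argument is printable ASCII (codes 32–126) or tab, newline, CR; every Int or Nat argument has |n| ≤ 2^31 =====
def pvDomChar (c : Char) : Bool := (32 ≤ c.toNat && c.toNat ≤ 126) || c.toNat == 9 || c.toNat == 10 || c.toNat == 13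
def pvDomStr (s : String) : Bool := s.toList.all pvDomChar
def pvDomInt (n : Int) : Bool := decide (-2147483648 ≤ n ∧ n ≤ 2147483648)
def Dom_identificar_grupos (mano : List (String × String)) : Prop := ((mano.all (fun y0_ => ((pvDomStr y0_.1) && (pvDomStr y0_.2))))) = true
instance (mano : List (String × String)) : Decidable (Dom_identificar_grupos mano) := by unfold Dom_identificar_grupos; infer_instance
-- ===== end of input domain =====

-- B groups the hand once into a dict keyed by carta[0] and classifies the valid values by a
-- recursion building the result front-to-back, instead of A's 13 full rescans of the hand with
-- append-accumulators; equal to A wherever A's set-iteration order cannot show (Pre_).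

def v_validos : List String := ["2", "3", "4", "5", "6", "7", "8", "9", "10", "J", "Q", "K", "A"]

-- ===== PORT A =====
def identificar_grupos (mano : List (String × String)) : (List (List (String × String))) × (List (List (String × String))) :=
  let tc := v_validos.foldl (fun st valor =>
      let cartas := mano.filter (fun carta => carta.1 == valor)
      if cartas.length == 4 then (st.1, st.2 ++ [cartas])
      else if cartas.length == 3 then (st.1 ++ [cartas], st.2)
      else st) ([], [])
  -- list(set(ternas)), list(set(cuaternas)): exact here because inside Pre_ each list has ≤ 1 element
  (PySem.Set.ofList tc.1, PySem.Set.ofList tc.2)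

-- ===== PORT B =====
-- clasificar(vals): recursion on the value list, consing each found group onto the result of the rest
def clasificar (grupos : PySem.Dict String (List (String × String))) : List String → (List (List (String × String))) × (List (List (String × String)))
  | [] => ([], [])
  | v :: vs =>
      let tc := clasificar grupos vs
      let cartas := grupos.getD v []
      if cartas.length == 3 then (cartas :: tc.1, tc.2)
      else if cartas.length == 4 then (tc.1, cartas :: tc.2)
      else tc

def identificar_grupos_alt (mano : List (String × String)) : (List (List (String × String))) × (List (List (String × String))) :=
  -- grupos.setdefault(carta[0], []).append(carta) (carta[0] = the value string)  ==  Dict.modify with append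
  let grupos : PySem.Dict String (List (String × String)) :=
    mano.foldl (fun d carta => d.modify (carta.1) [] (· ++ [carta])) PySem.Dict.empty
  clasificar grupos v_validos

-- ===== PRECONDITION & SPEC =====
-- Pre_ excludes hands with two or more triples, or two or more quads, on which A still
-- returns but the ORDER of A's list(set(...)) result depends on the interpreter's hash
-- seed, so no single list value is specified there (B uses v_validos order).
def Pre_identificar_grupos (mano : List (String × String)) : Prop :=
  (v_validos.filter (fun v => (mano.filter (fun c => c.1 == v)).length == 3)).length ≤ 1 ∧
  (v_validos.filter (fun v => (mano.filter (fun c => c.1 == v)).length == 4)).length ≤ 1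
instance (mano : List (String × String)) : Decidable (Pre_identificar_grupos mano) := by unfold Pre_identificar_grupos; infer_instance

def pvWitness_identificar_grupos : (List (String × String)) := [("2", "a"), ("2", "b"), ("2", "c")]

def Spec_identificar_grupos (mano : List (String × String)) (out : (List (List (String × String))) × (List (List (String × String)))) : Prop := out = identificar_grupos_alt mano
instance (mano : List (String × String)) (out : (List (List (String × String))) × (List (List (String × String)))) : Decidable (Spec_identificar_grupos mano out) := by unfold Spec_identificar_grupos; infer_instance

-- ===== CLAIM (what is proved, stated in full; the proofs are below) =====
def Claim_equal_identificar_grupos : Prop := ∀ (mano : List (String × String)), Dom_identificar_grupos mano → Pre_identificar_grupos mano → Spec_identificar_grupos mano (identificar_grupos mano)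

-- ===== LEMMAS AND PROOFS =====

-- the grouping dict looks up to exactly the filtered hand
lemma getD_group (mano : List (String × String)) (d : PySem.Dict String (List (String × String))) (v : String) :
    (mano.foldl (fun d carta => d.modify (carta.1) [] (· ++ [carta])) d).getD v [] =
      d.getD v [] ++ mano.filter (fun c => c.1 == v) := by
  induction mano generalizing d with
  | nil => simp
  | cons p rest ih =>
      simp only [List.foldl_cons, ih, List.filter_cons]
      rw [PySem.Dict.getD_modify]
      by_cases h : v = p.1
      · simp [h, List.append_assoc]
      · simp [h, beq_iff_eq, Ne.symm h]

-- a list of length ≤ 1 is its own set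
lemma ofList_short {α : Type} [BEq α] [LawfulBEq α] (l : List α) (h : l.length ≤ 1) :
    PySem.Set.ofList l = l := by
  match l with
  | [] => rfl
  | [x] => simp [PySem.Set.ofList, PySem.Set.add, PySem.Set.empty]
  | x :: y :: rest => simp at h

-- B's recursion computes the filtered value lists, front to back
lemma clasificar_eq (grupos : PySem.Dict String (List (String × String))) (vals : List String) :
    clasificar grupos vals =
      ((vals.filter (fun v => (grupos.getD v []).length == 3)).map (fun v => grupos.getD v []),
       (vals.filter (fun v => (grupos.getD v []).length == 4)).map (fun v => grupos.getD v [])) := by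
  induction vals with
  | nil => rfl
  | cons v vs ih =>
      simp only [clasificar, ih, List.filter_cons]
      by_cases h3 : (grupos.getD v []).length = 3
      · simp [h3]
      · by_cases h4 : (grupos.getD v []).length = 4
        · simp [h4]
        · simp [h3, h4]

-- A's pair step is two independent accumulators (ifs pushed into each component)
lemma step_split (mano : List (String × String)) :
    (fun (st : (List (List (String × String))) × (List (List (String × String)))) (valor : String) =>
      let cartas := mano.filter (fun carta => carta.1 == valor)
      if cartas.length == 4 then (st.1, st.2 ++ [cartas])
      else if cartas.length == 3 then (st.1 ++ [cartas], st.2)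
      else st)
    = (fun st valor =>
      (if ((mano.filter (fun c => c.1 == valor)).length == 3) then st.1 ++ [mano.filter (fun c => c.1 == valor)] else st.1,
       if ((mano.filter (fun c => c.1 == valor)).length == 4) then st.2 ++ [mano.filter (fun c => c.1 == valor)] else st.2)) := by
  funext st valor
  simp only [beq_iff_eq]
  split_ifs with h4 h3 h3' <;> simp_all

-- ===== VERDICT (by name: the statement is the Claim_ definition above) =====
theorem identificar_grupos_spec : Claim_equal_identificar_grupos := by
  intro mano _ hpre
  obtain ⟨h3, h4⟩ := hpre
  unfold Spec_identificar_grupos identificar_grupos identificar_grupos_alt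
  rw [clasificar_eq]
  have hg : ∀ v : String,
      ((mano.foldl (fun d carta => d.modify (carta.1) [] (· ++ [carta])) PySem.Dict.empty).getD v [])
        = mano.filter (fun c => c.1 == v) := by
    intro v; rw [getD_group]; rfl
  simp only [hg]
  rw [step_split mano]
  rw [PySem.List.foldl_prod_mk
      (f := fun acc v => if ((mano.filter (fun c => c.1 == v)).length == 3) then acc ++ [mano.filter (fun c => c.1 == v)] else acc)
      (g := fun acc v => if ((mano.filter (fun c => c.1 == v)).length == 4) then acc ++ [mano.filter (fun c => c.1 == v)] else acc)]
  rw [PySem.List.foldl_append_if, PySem.List.foldl_append_if]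
  simp only [List.nil_append]
  exact Prod.ext (ofList_short _ (by simpa using h3)) (ofList_short _ (by simpa using h4))
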